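-- pv_equiv track=rewrite | github.com/hypeneural/vivoevento | apps/api/app/Modules/FaceSearch/Support/export_cofw.py | normalize_splits
-- ===== SOURCE A (Python) =====
-- def normalize_splits(raw_value: str) -> list[str]:
--     splits: list[str] = []
--
--     for token in raw_value.split(","):
--         value = token.strip().lower()
--
--         if not value:
--             continue
--
--         if value == "all":
--             splits.extend(["train", "test"])
--             continue
--
--         if value in {"train", "test"}:
--             splits.append(value)
--
--     if not splits:
--         return ["train", "test"]
--
--     seen: set[str] = set()
--     normalized: list[str] = []
--
--     for split in splits:
--         if split in seen:
--             continue
--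
--         seen.add(split)
--         normalized.append(split)
--
--     return normalized
-- ===== SOURCE B (Python) =====
-- def normalize_splits(raw_value: str) -> list[str]:
--     train_pos = None
--     test_pos = None
--     for i, token in enumerate(raw_value.split(",")):
--         v = token.strip().lower()
--         if v in ("train", "all") and train_pos is None:
--             train_pos = i
--         if v in ("test", "all") and test_pos is None:
--             test_pos = i
--     if train_pos is None and test_pos is None:
--         return ["train", "test"]
--     if test_pos is None:
--         return ["train"]
--     if train_pos is None:
--         return ["test"]
--     return ["train", "test"] if train_pos <= test_pos else ["test", "train"]
-- ===== Notes on version B (the rewrite author's own statement) =====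
-- stated objective: alternative
-- what changed: Instead of building an intermediate list of split names and deduplicating it with a seen-set, B records only the first token index at which each of the two split kinds ('train'/'test', both via 'all') occurs and assembles the answer from a five-way closed-form table on those two optional indices.
import Mathlib
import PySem

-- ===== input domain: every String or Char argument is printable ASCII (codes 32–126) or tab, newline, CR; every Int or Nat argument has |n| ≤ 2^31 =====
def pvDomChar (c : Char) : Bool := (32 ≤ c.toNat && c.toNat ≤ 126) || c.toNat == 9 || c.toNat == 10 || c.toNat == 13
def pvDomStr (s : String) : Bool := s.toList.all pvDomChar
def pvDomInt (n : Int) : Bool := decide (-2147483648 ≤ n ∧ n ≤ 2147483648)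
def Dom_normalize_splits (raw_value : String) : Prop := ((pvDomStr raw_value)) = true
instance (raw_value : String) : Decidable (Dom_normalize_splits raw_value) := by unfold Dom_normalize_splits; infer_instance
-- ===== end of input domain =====

-- B records only the FIRST token index at which each split kind ('train'/'test', via 'all')
-- occurs and assembles the answer from a five-way closed-form table on those two optional
-- indices — no intermediate list and no dedup structure. Objective: alternative.

-- ===== PORT A =====
def nsStepA (splits : List String) (token : String) : List String :=
  let value := PySem.Str.lower (PySem.Str.strip token)
  if value = "" then splits
  else if value = "all" then splits ++ ["train", "test"]
  else if value = "train" ∨ value = "test" then splits ++ [value]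
  else splits

def nsDedupA (st : PySem.Set String × List String) (split : String) :
    PySem.Set String × List String :=
  if PySem.Set.contains st.1 split then st
  else (PySem.Set.add st.1 split, st.2 ++ [split])

def normalize_splits (raw_value : String) : List String :=
  let splits := ((PySem.Str.split? raw_value ",").getD []).foldl nsStepA []
  if splits = [] then ["train", "test"]
  else (splits.foldl nsDedupA (PySem.Set.empty, [])).2

-- ===== PORT B =====
def nsStepB (st : Option Int × Option Int) (p : Int × String) : Option Int × Option Int :=
  let v := PySem.Str.lower (PySem.Str.strip p.2)
  let tp := if (v = "train" ∨ v = "all") ∧ st.1 = none then some p.1 else st.1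
  let te := if (v = "test" ∨ v = "all") ∧ st.2 = none then some p.1 else st.2
  (tp, te)

-- the trailing if/return chain of B, on the pair (train_pos, test_pos)
def nsTable (st : Option Int × Option Int) : List String :=
  match st with
  | (none, none) => ["train", "test"]
  | (some _, none) => ["train"]
  | (none, some _) => ["test"]
  | (some i, some j) => if i ≤ j then ["train", "test"] else ["test", "train"]

def normalize_splits_alt (raw_value : String) : List String :=
  nsTable ((PySem.List.enumerate ((PySem.Str.split? raw_value ",").getD [])).foldl
    nsStepB (none, none))

-- ===== PRECONDITION & SPEC =====
def Spec_normalize_splits (raw_value : String) (out : List String) : Prop := out = normalize_splits_alt raw_value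
instance (raw_value : String) (out : List String) : Decidable (Spec_normalize_splits raw_value out) := by unfold Spec_normalize_splits; infer_instance

-- ===== CLAIM (what is proved, stated in full; the proofs are below) =====
def Claim_equal_normalize_splits : Prop := ∀ (raw_value : String), Dom_normalize_splits raw_value → Spec_normalize_splits raw_value (normalize_splits raw_value)

-- ===== LEMMAS AND PROOFS =====

-- the contribution of one (already stripped/lowered) token value to A's intermediate list
def nsItemsV (v : String) : List String :=
  if v = "" then []
  else if v = "all" then ["train", "test"]
  else if v = "train" ∨ v = "test" then [v]
  else []

def nsItems (token : String) : List String :=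
  nsItemsV (PySem.Str.lower (PySem.Str.strip token))

def nsOther (h : String) : String := if h = "train" then "test" else "train"

-- common description of the answer, in terms of A's intermediate list
def nsMid (L : List String) : List String :=
  match L with
  | [] => ["train", "test"]
  | h :: t => h :: (if nsOther h ∈ t then [nsOther h] else [])

theorem nsOther_ne (h : String) : nsOther h ≠ h := by
  unfold nsOther; split_ifs with hh
  · subst hh; decide
  · exact fun e => hh e.symm

theorem nsItemsV_mem (v x : String) (hx : x ∈ nsItemsV v) : x = "train" ∨ x = "test" := by
  unfold nsItemsV at hx
  split_ifs at hx <;> simp_all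

theorem train_mem_itemsV (v : String) : "train" ∈ nsItemsV v ↔ (v = "train" ∨ v = "all") := by
  unfold nsItemsV
  split_ifs with h1 h2 h3
  · subst h1; simp
  · subst h2; simp
  · rw [List.mem_singleton]
    constructor
    · intro h; exact Or.inl h.symm
    · rintro (h | h)
      · exact h.symm
      · exact absurd h h2
  · simp only [List.not_mem_nil, false_iff]
    rintro (h | h)
    · exact h3 (Or.inl h)
    · exact h2 h

theorem test_mem_itemsV (v : String) : "test" ∈ nsItemsV v ↔ (v = "test" ∨ v = "all") := by
  unfold nsItemsV
  split_ifs with h1 h2 h3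
  · subst h1; simp
  · subst h2; simp
  · rw [List.mem_singleton]
    constructor
    · intro h; exact Or.inl h.symm
    · rintro (h | h)
      · exact h.symm
      · exact absurd h h2
  · simp only [List.not_mem_nil, false_iff]
    rintro (h | h)
    · exact h3 (Or.inr h)
    · exact h2 h

theorem nsStepA_eq (splits : List String) (token : String) :
    nsStepA splits token = splits ++ nsItems token := by
  unfold nsStepA nsItems nsItemsV
  dsimp only
  split_ifs <;> simp

theorem foldl_nsStepA (tokens : List String) :
    tokens.foldl nsStepA [] = tokens.flatMap nsItems := by
  have h : nsStepA = fun acc x => acc ++ nsItems x :=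
    funext fun a => funext fun t => nsStepA_eq a t
  rw [h, PySem.List.foldl_append_eq_flatMap, List.nil_append]

theorem flatMap_mem (toks : List String) (x : String) (hx : x ∈ toks.flatMap nsItems) :
    x = "train" ∨ x = "test" := by
  rcases List.mem_flatMap.mp hx with ⟨t, _, hxt⟩
  exact nsItemsV_mem _ x hxt

-- A-side: the dedup loop when everything left is already seen
theorem dedup_skip_all (t : List String) (S : PySem.Set String) (acc : List String)
    (h : ∀ x ∈ t, PySem.Set.contains S x = true) :
    t.foldl nsDedupA (S, acc) = (S, acc) := by
  induction t with
  | nil => rfl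
  | cons x xs ih =>
    have hx := h x (List.mem_cons_self)
    simp only [List.foldl_cons, nsDedupA, hx, if_pos]
    exact ih (fun y hy => h y (List.mem_cons_of_mem _ hy))

theorem contains_add_self (S : PySem.Set String) (x : String) :
    PySem.Set.contains (PySem.Set.add S x) x = true := by
  simp [PySem.Set.add, PySem.Set.contains]
  split_ifs with h <;> simp_all

theorem contains_add_of (S : PySem.Set String) (x y : String)
    (h : PySem.Set.contains S y = true) :
    PySem.Set.contains (PySem.Set.add S x) y = true := by
  simp [PySem.Set.add, PySem.Set.contains] at h ⊢
  split_ifs with hc <;> simp_all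

theorem not_mem_of_contains_false (S : PySem.Set String) (x : String)
    (h : PySem.Set.contains S x = false) : x ∉ S := by
  simp [PySem.Set.contains] at h
  simpa using h

-- A-side: the dedup loop after the first element is seen
theorem dedup_one (h : String) (t : List String) (S : PySem.Set String) (acc : List String)
    (hh : PySem.Set.contains S h = true)
    (ho : PySem.Set.contains S (nsOther h) = false)
    (hall : ∀ x ∈ t, x = h ∨ x = nsOther h) :
    (t.foldl nsDedupA (S, acc)).2 = acc ++ (if nsOther h ∈ t then [nsOther h] else []) := by
  induction t generalizing S acc with
  | nil => simp
  | cons x xs ih =>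
    rcases hall x List.mem_cons_self with hx | hx
    · subst hx
      simp only [List.foldl_cons, nsDedupA, hh, if_pos]
      rw [ih S acc hh ho (fun y hy => hall y (List.mem_cons_of_mem _ hy))]
      simp [List.mem_cons, nsOther_ne x]
    · subst hx
      have hstep1 : nsDedupA (S, acc) (nsOther h)
          = (PySem.Set.add S (nsOther h), acc ++ [nsOther h]) := by
        simp [nsDedupA, not_mem_of_contains_false _ _ ho]
      rw [List.foldl_cons, hstep1,
        dedup_skip_all xs _ _ (fun y hy => by
          rcases hall y (List.mem_cons_of_mem _ hy) with hy' | hy'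
          · subst hy'; exact contains_add_of S _ y hh
          · subst hy'; exact contains_add_self S _)]
      simp

-- A equals the common description
theorem A_eq_mid (toks : List String) :
    (if toks.foldl nsStepA [] = [] then ["train", "test"]
     else ((toks.foldl nsStepA []).foldl nsDedupA (PySem.Set.empty, [])).2)
    = nsMid (toks.flatMap nsItems) := by
  rw [foldl_nsStepA]
  cases hL : toks.flatMap nsItems with
  | nil => simp [nsMid]
  | cons h t =>
    have hmem : ∀ x ∈ h :: t, x = "train" ∨ x = "test" := by
      intro x hx; exact flatMap_mem toks x (hL ▸ hx)
    have hcons : (h :: t : List String) ≠ [] := by simp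
    rw [if_neg hcons]
    have hh : h = "train" ∨ h = "test" := hmem h List.mem_cons_self
    have hfirst : nsDedupA (PySem.Set.empty, []) h
        = (PySem.Set.add PySem.Set.empty h, [h]) := by
      simp [nsDedupA, PySem.Set.contains, PySem.Set.empty]
    have hcont : PySem.Set.contains (PySem.Set.add PySem.Set.empty h) h = true :=
      contains_add_self _ _
    have hnot : PySem.Set.contains (PySem.Set.add PySem.Set.empty h) (nsOther h) = false := by
      simp [PySem.Set.contains, PySem.Set.add, PySem.Set.empty]
      exact nsOther_ne h
    have hall : ∀ x ∈ t, x = h ∨ x = nsOther h := by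
      intro x hx
      rcases hmem x (List.mem_cons_of_mem _ hx) with hx' | hx' <;>
        rcases hh with hh' | hh' <;> subst hx' <;> subst hh' <;> simp [nsOther]
    simp only [List.foldl_cons, hfirst]
    rw [dedup_one h t _ [h] hcont hnot hall]
    simp [nsMid]

-- B-side: once both positions are set, the loop never changes them
theorem stepB_fixed (l : List (Int × String)) (a b : Int) :
    l.foldl nsStepB (some a, some b) = (some a, some b) := by
  induction l with
  | nil => rfl
  | cons p ps ih => simpa [nsStepB] using ih

-- B-side: with train_pos set and test_pos unset, what the rest of the loop does
theorem foldB_te (ts : List String) (k b : Int) :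
    ((PySem.List.enumerate ts b).foldl nsStepB (some k, none)).1 = some k ∧
    (((PySem.List.enumerate ts b).foldl nsStepB (some k, none)).2 = none
      ↔ "test" ∉ ts.flatMap nsItems) ∧
    (∀ j, ((PySem.List.enumerate ts b).foldl nsStepB (some k, none)).2 = some j → b ≤ j) := by
  induction ts generalizing b with
  | nil => simp [PySem.List.enumerate_nil]
  | cons t ts ih =>
    rw [PySem.List.enumerate_cons]
    by_cases hT : PySem.Str.lower (PySem.Str.strip t) = "test"
      ∨ PySem.Str.lower (PySem.Str.strip t) = "all"
    · have hstep : nsStepB (some k, none) (b, t) = (some k, some b) := by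
        simp [nsStepB, hT]
      rw [List.foldl_cons, hstep, stepB_fixed]
      refine ⟨rfl, ?_, ?_⟩
      · simp only [reduceCtorEq, false_iff, not_not]
        apply List.mem_flatMap.mpr
        exact ⟨t, List.mem_cons_self, (test_mem_itemsV _).mpr hT⟩
      · intro j hj
        simp at hj; omega
    · have hT' : ¬ PySem.Str.lower (PySem.Str.strip t) = "test"
          ∧ ¬ PySem.Str.lower (PySem.Str.strip t) = "all" :=
        ⟨fun h => hT (Or.inl h), fun h => hT (Or.inr h)⟩
      have hstep : nsStepB (some k, none) (b, t) = (some k, none) := by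
        simp [nsStepB, hT'.1, hT'.2]
      rw [List.foldl_cons, hstep]
      obtain ⟨ih1, ih2, ih3⟩ := ih (b + 1)
      refine ⟨ih1, ?_, fun j hj => by have := ih3 j hj; omega⟩
      rw [ih2]
      have hni : "test" ∉ nsItems t := fun hm => hT ((test_mem_itemsV _).mp hm)
      rw [show (t :: ts).flatMap nsItems = nsItems t ++ ts.flatMap nsItems from
        List.flatMap_cons ..]
      simp [List.mem_append, hni]

-- B-side: symmetric, with test_pos set and train_pos unset
theorem foldB_tp (ts : List String) (k b : Int) :
    ((PySem.List.enumerate ts b).foldl nsStepB (none, some k)).2 = some k ∧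
    (((PySem.List.enumerate ts b).foldl nsStepB (none, some k)).1 = none
      ↔ "train" ∉ ts.flatMap nsItems) ∧
    (∀ j, ((PySem.List.enumerate ts b).foldl nsStepB (none, some k)).1 = some j → b ≤ j) := by
  induction ts generalizing b with
  | nil => simp [PySem.List.enumerate_nil]
  | cons t ts ih =>
    rw [PySem.List.enumerate_cons]
    by_cases hT : PySem.Str.lower (PySem.Str.strip t) = "train"
      ∨ PySem.Str.lower (PySem.Str.strip t) = "all"
    · have hstep : nsStepB (none, some k) (b, t) = (some b, some k) := by
        simp [nsStepB, hT]
      rw [List.foldl_cons, hstep, stepB_fixed]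
      refine ⟨rfl, ?_, ?_⟩
      · simp only [reduceCtorEq, false_iff, not_not]
        apply List.mem_flatMap.mpr
        exact ⟨t, List.mem_cons_self, (train_mem_itemsV _).mpr hT⟩
      · intro j hj
        simp at hj; omega
    · have hT' : ¬ PySem.Str.lower (PySem.Str.strip t) = "train"
          ∧ ¬ PySem.Str.lower (PySem.Str.strip t) = "all" :=
        ⟨fun h => hT (Or.inl h), fun h => hT (Or.inr h)⟩
      have hstep : nsStepB (none, some k) (b, t) = (none, some k) := by
        simp [nsStepB, hT'.1, hT'.2]
      rw [List.foldl_cons, hstep]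
      obtain ⟨ih1, ih2, ih3⟩ := ih (b + 1)
      refine ⟨ih1, ?_, fun j hj => by have := ih3 j hj; omega⟩
      rw [ih2]
      have hni : "train" ∉ nsItems t := fun hm => hT ((train_mem_itemsV _).mp hm)
      rw [show (t :: ts).flatMap nsItems = nsItems t ++ ts.flatMap nsItems from
        List.flatMap_cons ..]
      simp [List.mem_append, hni]

-- B equals the common description
theorem B_eq_mid (toks : List String) (base : Int) :
    nsTable ((PySem.List.enumerate toks base).foldl nsStepB (none, none))
    = nsMid (toks.flatMap nsItems) := by
  induction toks generalizing base with
  | nil => simp [PySem.List.enumerate_nil, nsTable, nsMid]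
  | cons t ts ih =>
    rw [PySem.List.enumerate_cons, List.foldl_cons]
    by_cases h1 : PySem.Str.lower (PySem.Str.strip t) = "all"
    · have hstep : nsStepB (none, none) (base, t) = (some base, some base) := by
        simp [nsStepB, h1]
      rw [hstep, stepB_fixed]
      have hit : nsItems t = ["train", "test"] := by
        unfold nsItems; rw [h1]; rfl
      rw [List.flatMap_cons, hit]
      simp [nsTable, nsMid, nsOther]
    · by_cases h2 : PySem.Str.lower (PySem.Str.strip t) = "train"
      · have hstep : nsStepB (none, none) (base, t) = (some base, none) := by
          simp [nsStepB, h2]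
        rw [hstep]
        obtain ⟨r1, r2, r3⟩ := foldB_te ts base (base + 1)
        have hit : nsItems t = ["train"] := by
          unfold nsItems; rw [h2]; rfl
        rw [List.flatMap_cons, hit]
        rcases hr : ((PySem.List.enumerate ts (base + 1)).foldl nsStepB (some base, none)).2 with
          _ | j
        · have hnot : "test" ∉ ts.flatMap nsItems := r2.mp hr
          have hpair : ((PySem.List.enumerate ts (base + 1)).foldl nsStepB (some base, none))
              = (some base, none) := Prod.ext r1 hr
          rw [hpair]
          simp [nsTable, nsMid, nsOther, hnot]
        · have hin : "test" ∈ ts.flatMap nsItems := by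
            by_contra hc
            rw [← r2] at hc
            simp [hr] at hc
          have hle : base ≤ j := by have := r3 j hr; omega
          have hpair : ((PySem.List.enumerate ts (base + 1)).foldl nsStepB (some base, none))
              = (some base, some j) := Prod.ext r1 hr
          rw [hpair]
          simp [nsTable, nsMid, nsOther, hin, hle]
      · by_cases h3 : PySem.Str.lower (PySem.Str.strip t) = "test"
        · have hstep : nsStepB (none, none) (base, t) = (none, some base) := by
            simp [nsStepB, h3]
          rw [hstep]
          obtain ⟨r1, r2, r3⟩ := foldB_tp ts base (base + 1)
          have hit : nsItems t = ["test"] := by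
            unfold nsItems; rw [h3]; rfl
          rw [List.flatMap_cons, hit]
          rcases hr : ((PySem.List.enumerate ts (base + 1)).foldl nsStepB (none, some base)).1 with
            _ | j
          · have hnot : "train" ∉ ts.flatMap nsItems := r2.mp hr
            have hpair : ((PySem.List.enumerate ts (base + 1)).foldl nsStepB (none, some base))
                = (none, some base) := Prod.ext hr r1
            rw [hpair]
            simp [nsTable, nsMid, nsOther, hnot]
          · have hin : "train" ∈ ts.flatMap nsItems := by
              by_contra hc
              rw [← r2] at hc
              simp [hr] at hc
            have hlt : ¬ (j ≤ base) := by have := r3 j hr; omega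
            have hpair : ((PySem.List.enumerate ts (base + 1)).foldl nsStepB (none, some base))
                = (some j, some base) := Prod.ext hr r1
            rw [hpair]
            simp [nsTable, nsMid, nsOther, hin, hlt]
        · have hstep : nsStepB (none, none) (base, t) = (none, none) := by
            simp [nsStepB, h1, h2, h3]
          rw [hstep]
          have hit : nsItems t = [] := by
            unfold nsItems nsItemsV
            split_ifs <;> simp_all
          rw [List.flatMap_cons, hit, List.nil_append]
          exact ih (base + 1)

-- ===== VERDICT (by name: the statement is the Claim_ definition above) =====
theorem normalize_splits_spec : Claim_equal_normalize_splits := by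
  intro raw_value _
  unfold Spec_normalize_splits normalize_splits normalize_splits_alt
  rw [A_eq_mid, B_eq_mid]
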